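-- pv_equiv track=rewrite | github.com/vanschependom/KULAK_beginselen-van-programmeren | oefeningen examen/leveringen.py | maxPakjes
-- ===== SOURCE A (Python) =====
-- def maxPakjes(leveringen, reistijden, volgorde=[1, 2, 3, 4]):
--
--     # Initialiseer de tijd
--     tijd = 8 * 60
--     # Inladen
--     tijd += len(leveringen)*2
--
--     # Startpositie
--     positie = 0
--
--     # In deze lijst wordt bijgehouden welke levering op tijd waren en op welk uur ze geleverd zijn
--     opTijd = list()
--
--     # Loop over de leveringen
--     for i, levering in enumerate(leveringen):
--
--         # Pas de tijd aan
--         tijd += reistijden[positie][volgorde[i]]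
--         tijd += 5
--
--         # Als het pakje op tijd was, voeg het toe aan de lijst opTijd
--         if tijd <= levering[1] * 60 + levering[2]:
--             opTijd.append((levering[0], tijd//60, tijd % 60))
--
--         # Pas de positie aan
--         positie = volgorde[i]
--
--     # We keren terug naar het depot
--     tijd += reistijden[positie][0]
--
--     # Return welke leveringen op tijd waren en wat de totale tijd in minuten was
--     return opTijd, tijd
-- ===== SOURCE B (Python) =====
-- def maxPakjes(leveringen, reistijden, volgorde=[1, 2, 3, 4]):
--     n = len(leveringen)
--     stops = [volgorde[i] for i in range(n)]
--     route = [0] + stops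
--     legs = [reistijden[p][q] + 5 for p, q in zip(route, stops)]
--     t = 8 * 60 + 2 * n
--     arrivals = []
--     for leg in legs:
--         t += leg
--         arrivals.append(t)
--     opTijd = [(naam, at // 60, at % 60)
--               for (naam, uur, minuut), at in zip(leveringen, arrivals)
--               if at <= uur * 60 + minuut]
--     return opTijd, t + reistijden[route[-1]][0]
-- ===== Notes on version B (the rewrite author's own statement) =====
-- stated objective: alternative
-- what changed: A simulates the route with one stateful loop carrying (time, position, on-time list); B decomposes the task into a route list, per-leg travel times, prefix-sum arrival timestamps, and a separate zip-filter pass over the timestamps.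
import Mathlib
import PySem

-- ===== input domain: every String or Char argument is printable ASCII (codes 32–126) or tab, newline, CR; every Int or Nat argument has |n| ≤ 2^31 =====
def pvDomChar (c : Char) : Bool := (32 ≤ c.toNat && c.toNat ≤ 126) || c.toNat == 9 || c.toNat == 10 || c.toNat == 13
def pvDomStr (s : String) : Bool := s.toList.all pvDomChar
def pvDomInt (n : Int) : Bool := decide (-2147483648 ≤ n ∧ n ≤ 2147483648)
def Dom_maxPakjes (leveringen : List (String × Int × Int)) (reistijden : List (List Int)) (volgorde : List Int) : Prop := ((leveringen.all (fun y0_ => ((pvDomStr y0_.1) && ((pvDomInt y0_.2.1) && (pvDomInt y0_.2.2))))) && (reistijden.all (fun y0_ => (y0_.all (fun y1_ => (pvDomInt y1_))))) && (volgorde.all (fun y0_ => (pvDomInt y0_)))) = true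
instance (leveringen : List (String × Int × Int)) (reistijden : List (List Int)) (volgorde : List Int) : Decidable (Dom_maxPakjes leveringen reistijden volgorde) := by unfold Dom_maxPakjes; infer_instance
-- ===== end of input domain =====

-- B replaces A's single stateful simulation loop by a prefix-sum decomposition (route → legs → arrival
-- timestamps, then a filtering pass); objective: alternative decomposition, same cost.

-- ===== PORT A =====
-- literal transliteration of A's loop: state (tijd, positie, opTijd), folded over enumerate(leveringen)
def maxPakjes (leveringen : List (String × Int × Int)) (reistijden : List (List Int)) (volgorde : List Int) : (List (String × Int × Int)) × Int :=
  let st := (PySem.List.enumerate leveringen 0).foldl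
    (fun (st : Int × Int × List (String × Int × Int)) il =>
      let tijd := st.1 + PySem.List.pyGetD (PySem.List.pyGetD reistijden st.2.1 []) (PySem.List.pyGetD volgorde il.1 0) 0 + 5
      (tijd, PySem.List.pyGetD volgorde il.1 0,
        if tijd ≤ il.2.2.1 * 60 + il.2.2.2
        then st.2.2 ++ [(il.2.1, PySem.Int.floordiv tijd 60, PySem.Int.mod tijd 60)]
        else st.2.2))
    (8 * 60 + (leveringen.length : Int) * 2, 0, [])
  (st.2.2, st.1 + PySem.List.pyGetD (PySem.List.pyGetD reistijden st.2.1 []) 0 0)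

-- ===== PORT B =====
-- literal transliteration of Source B: stops, route, legs, prefix-sum arrivals, then zip-filter
def maxPakjes_alt (leveringen : List (String × Int × Int)) (reistijden : List (List Int)) (volgorde : List Int) : (List (String × Int × Int)) × Int :=
  let n := leveringen.length
  let stops : List Int := (List.range n).map (fun (i : Nat) => PySem.List.pyGetD volgorde (i : Int) 0)
  let route : List Int := 0 :: stops
  let legs : List Int := (route.zip stops).map
    (fun pq => PySem.List.pyGetD (PySem.List.pyGetD reistijden pq.1 []) pq.2 0 + 5)
  let st := legs.foldl (fun (st : Int × List Int) leg => (st.1 + leg, st.2 ++ [st.1 + leg]))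
    (8 * 60 + 2 * (n : Int), [])
  let opTijd := (leveringen.zip st.2).filterMap (fun p =>
    if p.2 ≤ p.1.2.1 * 60 + p.1.2.2
    then some (p.1.1, PySem.Int.floordiv p.2 60, PySem.Int.mod p.2 60) else none)
  (opTijd, st.1 + PySem.List.pyGetD (PySem.List.pyGetD reistijden (PySem.List.pyGetD route (-1) 0) []) 0 0)

-- ===== PRECONDITION & SPEC =====
-- Pre_ excludes exactly the inputs on which Python A raises IndexError: leveringen longer than
-- volgorde, or a travel-matrix access reistijden[p][q] on the driven route that is out of range.
def Pre_maxPakjes (leveringen : List (String × Int × Int)) (reistijden : List (List Int)) (volgorde : List Int) : Prop :=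
  leveringen.length ≤ volgorde.length ∧
  (∀ pq ∈ (((0 : Int) :: volgorde.take leveringen.length).zip
            ((volgorde.take leveringen.length) ++ [(0 : Int)])),
     PySem.Raise.InRange reistijden.length pq.1 ∧
     PySem.Raise.InRange (PySem.List.pyGetD reistijden pq.1 []).length pq.2)
instance (leveringen : List (String × Int × Int)) (reistijden : List (List Int)) (volgorde : List Int) : Decidable (Pre_maxPakjes leveringen reistijden volgorde) := by unfold Pre_maxPakjes; infer_instance

def pvWitness_maxPakjes : (List (String × Int × Int)) × List (List Int) × List Int :=
  ([("a", 9, 0)], [[0, 3], [4, 0]], [1])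

def Spec_maxPakjes (leveringen : List (String × Int × Int)) (reistijden : List (List Int)) (volgorde : List Int) (out : (List (String × Int × Int)) × Int) : Prop := out = maxPakjes_alt leveringen reistijden volgorde
instance (leveringen : List (String × Int × Int)) (reistijden : List (List Int)) (volgorde : List Int) (out : (List (String × Int × Int)) × Int) : Decidable (Spec_maxPakjes leveringen reistijden volgorde out) := by unfold Spec_maxPakjes; infer_instance

-- ===== CLAIM (what is proved, stated in full; the proofs are below) =====
def Claim_equal_maxPakjes : Prop := ∀ (leveringen : List (String × Int × Int)) (reistijden : List (List Int)) (volgorde : List Int), Dom_maxPakjes leveringen reistijden volgorde → Pre_maxPakjes leveringen reistijden volgorde → Spec_maxPakjes leveringen reistijden volgorde (maxPakjes leveringen reistijden volgorde)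

-- ===== LEMMAS AND PROOFS =====

-- reference recursion shared by the two proofs: final (time, position) after n steps from index j
def pvFin (reis : List (List Int)) (vol : List Int) : Nat → Nat → Int → Int → Int × Int
  | 0, _, t, p => (t, p)
  | n+1, j, t, p =>
      pvFin reis vol n (j+1)
        (t + PySem.List.pyGetD (PySem.List.pyGetD reis p []) (PySem.List.pyGetD vol (j : Int) 0) 0 + 5)
        (PySem.List.pyGetD vol (j : Int) 0)

-- arrival timestamps of the n steps
def pvTimes (reis : List (List Int)) (vol : List Int) : Nat → Nat → Int → Int → List Int
  | 0, _, _, _ => []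
  | n+1, j, t, p =>
      (t + PySem.List.pyGetD (PySem.List.pyGetD reis p []) (PySem.List.pyGetD vol (j : Int) 0) 0 + 5)
        :: pvTimes reis vol n (j+1)
            (t + PySem.List.pyGetD (PySem.List.pyGetD reis p []) (PySem.List.pyGetD vol (j : Int) 0) 0 + 5)
            (PySem.List.pyGetD vol (j : Int) 0)

-- the on-time sublist A accumulates
def pvOn (reis : List (List Int)) (vol : List Int) : List (String × Int × Int) → Nat → Int → Int → List (String × Int × Int)
  | [], _, _, _ => []
  | l :: rest, j, t, p =>
      let t' := t + PySem.List.pyGetD (PySem.List.pyGetD reis p []) (PySem.List.pyGetD vol (j : Int) 0) 0 + 5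
      let tail := pvOn reis vol rest (j+1) t' (PySem.List.pyGetD vol (j : Int) 0)
      if t' ≤ l.2.1 * 60 + l.2.2 then (l.1, PySem.Int.floordiv t' 60, PySem.Int.mod t' 60) :: tail else tail

-- the stops list B builds, shifted to start at index j
def pvStops (vol : List Int) : Nat → Nat → List Int
  | 0, _ => []
  | n+1, j => PySem.List.pyGetD vol (j : Int) 0 :: pvStops vol n (j+1)

lemma pvStops_eq (vol : List Int) : ∀ n j, pvStops vol n j = (List.range n).map (fun (i : Nat) => PySem.List.pyGetD vol ((j + i : Nat) : Int) 0) := by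
  intro n
  induction n with
  | zero => intro j; rfl
  | succ n ih =>
      intro j
      rw [List.range_succ_eq_map, List.map_cons, List.map_map]
      have h1 : ((fun (i : Nat) => PySem.List.pyGetD vol ((j + i : Nat) : Int) 0) ∘ Nat.succ)
          = fun (i : Nat) => PySem.List.pyGetD vol (((j + 1) + i : Nat) : Int) 0 := by
        funext i
        simp only [Function.comp_apply]
        congr 1
        omega
      rw [h1, ← ih (j+1)]
      simp only [pvStops]
      congr 1

lemma pvStops0 (vol : List Int) (n : Nat) : pvStops vol n 0 = (List.range n).map (fun (i : Nat) => PySem.List.pyGetD vol (i : Int) 0) := by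
  rw [pvStops_eq vol n 0]
  simp

lemma pvA_loop (reis : List (List Int)) (vol : List Int) :
    ∀ (lev : List (String × Int × Int)) (j : Nat) (t p : Int) (acc : List (String × Int × Int)),
    (PySem.List.enumerate lev (j : Int)).foldl
      (fun (st : Int × Int × List (String × Int × Int)) il =>
        (st.1 + PySem.List.pyGetD (PySem.List.pyGetD reis st.2.1 []) (PySem.List.pyGetD vol il.1 0) 0 + 5,
         PySem.List.pyGetD vol il.1 0,
         if st.1 + PySem.List.pyGetD (PySem.List.pyGetD reis st.2.1 []) (PySem.List.pyGetD vol il.1 0) 0 + 5 ≤ il.2.2.1 * 60 + il.2.2.2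
         then st.2.2 ++ [(il.2.1,
                PySem.Int.floordiv (st.1 + PySem.List.pyGetD (PySem.List.pyGetD reis st.2.1 []) (PySem.List.pyGetD vol il.1 0) 0 + 5) 60,
                PySem.Int.mod (st.1 + PySem.List.pyGetD (PySem.List.pyGetD reis st.2.1 []) (PySem.List.pyGetD vol il.1 0) 0 + 5) 60)]
         else st.2.2))
      (t, p, acc)
    = ((pvFin reis vol lev.length j t p).1, (pvFin reis vol lev.length j t p).2,
        acc ++ pvOn reis vol lev j t p) := by
  intro lev
  induction lev with
  | nil => intro j t p acc; simp [PySem.List.enumerate_nil, pvFin, pvOn]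
  | cons l rest ih =>
      intro j t p acc
      rw [PySem.List.enumerate_cons]
      simp only [List.foldl_cons]
      have hcast : ((j : Int) + 1) = ((j + 1 : Nat) : Int) := by push_cast; ring
      rw [hcast, ih (j+1)]
      simp only [pvFin, pvOn, List.length_cons]
      split_ifs <;> simp [List.append_assoc]

lemma pvB_fold (reis : List (List Int)) (vol : List Int) :
    ∀ (n j : Nat) (t p : Int) (done : List Int),
    (((p :: pvStops vol n j).zip (pvStops vol n j)).map
      (fun pq => PySem.List.pyGetD (PySem.List.pyGetD reis pq.1 []) pq.2 0 + 5)).foldl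
      (fun (st : Int × List Int) leg => (st.1 + leg, st.2 ++ [st.1 + leg])) (t, done)
    = ((pvFin reis vol n j t p).1, done ++ pvTimes reis vol n j t p) := by
  intro n
  induction n with
  | zero => intro j t p done; simp [pvStops, pvFin, pvTimes]
  | succ n ih =>
      intro j t p done
      simp only [pvStops, List.zip_cons_cons, List.map_cons, List.foldl_cons]
      have hx : t + (PySem.List.pyGetD (PySem.List.pyGetD reis p []) (PySem.List.pyGetD vol (j : Int) 0) 0 + 5)
          = t + PySem.List.pyGetD (PySem.List.pyGetD reis p []) (PySem.List.pyGetD vol (j : Int) 0) 0 + 5 := by ring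
      rw [hx, ih (j+1)]
      simp only [pvFin, pvTimes]
      simp [List.append_assoc]

lemma pvB_filter (reis : List (List Int)) (vol : List Int) :
    ∀ (lev : List (String × Int × Int)) (j : Nat) (t p : Int),
    (lev.zip (pvTimes reis vol lev.length j t p)).filterMap (fun q =>
      if q.2 ≤ q.1.2.1 * 60 + q.1.2.2
      then some (q.1.1, PySem.Int.floordiv q.2 60, PySem.Int.mod q.2 60) else none)
    = pvOn reis vol lev j t p := by
  intro lev
  induction lev with
  | nil => intro j t p; rfl
  | cons l rest ih =>
      intro j t p
      simp only [List.length_cons, pvTimes, List.zip_cons_cons, List.filterMap_cons, pvOn]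
      rw [ih (j+1)]
      split_ifs <;> rfl

-- xs[-1] skips a leading element when the tail is nonempty
lemma pvSkip (x : Int) (xs : List Int) (h : xs ≠ []) :
    PySem.List.pyGetD (x :: xs) (-1) (0 : Int) = PySem.List.pyGetD xs (-1) 0 := by
  rw [PySem.List.pyGetD_neg_one (x :: xs) 0 (List.cons_ne_nil x xs),
      PySem.List.pyGetD_neg_one xs 0 h, List.getLast_cons h]

lemma pvB_last (reis : List (List Int)) (vol : List Int) :
    ∀ (n j : Nat) (t p : Int),
    PySem.List.pyGetD (p :: pvStops vol n j) (-1) 0 = (pvFin reis vol n j t p).2 := by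
  intro n
  induction n with
  | zero => intro j t p; simp [pvStops, pvFin, PySem.List.pyGetD_neg_one]
  | succ n ih =>
      intro j t p
      show PySem.List.pyGetD (p :: PySem.List.pyGetD vol (j : Int) 0 :: pvStops vol n (j+1)) (-1) 0 = _
      rw [pvSkip p _ (List.cons_ne_nil _ _),
          ih (j+1) (t + PySem.List.pyGetD (PySem.List.pyGetD reis p []) (PySem.List.pyGetD vol (j : Int) 0) 0 + 5)
            (PySem.List.pyGetD vol (j : Int) 0)]
      rfl

-- ===== VERDICT (by name: the statement is the Claim_ definition above) =====
theorem maxPakjes_spec : Claim_equal_maxPakjes := by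
  intro lev reis vol _ _
  unfold Spec_maxPakjes maxPakjes maxPakjes_alt
  have hT : 8 * 60 + (lev.length : Int) * 2 = 8 * 60 + 2 * (lev.length : Int) := by ring
  have hA := pvA_loop reis vol lev 0 (8 * 60 + 2 * (lev.length : Int)) 0 []
  simp only [Nat.cast_zero] at hA
  have hB := pvB_fold reis vol lev.length 0 (8 * 60 + 2 * (lev.length : Int)) 0 []
  have hF := pvB_filter reis vol lev 0 (8 * 60 + 2 * (lev.length : Int)) 0
  have hL := pvB_last reis vol lev.length 0 (8 * 60 + 2 * (lev.length : Int)) 0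
  rw [hT]
  simp only [← pvStops0 vol lev.length, hA, hB, hF, hL, List.nil_append]
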